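-- pv_equiv track=rewrite | github.com/paulonteri/data-structures-and-algorithms | solutions/Trees and Graphs/Graphs/minimum_passes_of_matrix.py | removeNegatives
-- ===== SOURCE A (Python) =====
-- def removeNegatives(matrix):
--     res = 0
--     queue = []
--
--     # create initial queue
--     for row in range(len(matrix)):
--         for col in range(len(matrix[0])):
--             if matrix[row][col] > 0:
--                 queue.append((row, col))
--
--     # remove negatives
--     while queue:
--         has_negative = False
--         for _ in range(len(queue)):
--             row, col = queue.pop(0)
--
--             # left
--             if col-1 >= 0 and matrix[row][col-1] < 0:
--                 has_negative = True
--                 matrix[row][col-1] = matrix[row][col-1] * -1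
--                 queue.append((row, col-1))
--
--             # right
--             if col+1 < len(matrix[0]) and matrix[row][col+1] < 0:
--                 has_negative = True
--                 matrix[row][col+1] = matrix[row][col+1] * -1
--                 queue.append((row, col+1))
--
--             # above
--             if row-1 >= 0 and matrix[row-1][col] < 0:
--                 has_negative = True
--                 matrix[row-1][col] = matrix[row-1][col] * -1
--                 queue.append((row-1, col))
--
--             # below
--             if row+1 < len(matrix) and matrix[row+1][col] < 0:
--                 has_negative = True
--                 matrix[row+1][col] = matrix[row+1][col] * -1
--                 queue.append((row+1, col))
--
--         if has_negative:
--             res += 1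
--
--     return res
-- ===== SOURCE B (Python) =====
-- def removeNegatives(matrix):
--     # Single multi-source BFS with a per-cell distance instead of level snapshots;
--     # result = largest distance at which a negative cell gets flipped.
--     # Mutates matrix in place (flips negatives to positives), like the original.
--     rows = len(matrix)
--     cols = len(matrix[0]) if matrix else 0
--     q = []
--     for r in range(rows):
--         for c in range(cols):
--             if matrix[r][c] > 0:
--                 q.append((r, c, 0))
--     best = 0
--     i = 0
--     while i < len(q):
--         r, c, d = q[i]
--         i += 1
--         for nr, nc in ((r, c - 1), (r, c + 1), (r - 1, c), (r + 1, c)):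
--             if 0 <= nr < rows and 0 <= nc < cols and matrix[nr][nc] < 0:
--                 matrix[nr][nc] = -matrix[nr][nc]
--                 q.append((nr, nc, d + 1))
--                 if d + 1 > best:
--                     best = d + 1
--     return best
-- ===== Notes on version B (the rewrite author's own statement) =====
-- stated objective: faster
-- what changed: Replaces the level-snapshot BFS (inner pass over len(queue) items with quadratic queue.pop(0) and a has_negative flag per pass) by a single multi-source BFS that stores a distance with each enqueued cell, scans the queue with a moving index, and returns the running maximum distance of any flip. Pre_ excludes matrices with a row shorter than the first row, on which both Pythons raise IndexError.
import Mathlib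
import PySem

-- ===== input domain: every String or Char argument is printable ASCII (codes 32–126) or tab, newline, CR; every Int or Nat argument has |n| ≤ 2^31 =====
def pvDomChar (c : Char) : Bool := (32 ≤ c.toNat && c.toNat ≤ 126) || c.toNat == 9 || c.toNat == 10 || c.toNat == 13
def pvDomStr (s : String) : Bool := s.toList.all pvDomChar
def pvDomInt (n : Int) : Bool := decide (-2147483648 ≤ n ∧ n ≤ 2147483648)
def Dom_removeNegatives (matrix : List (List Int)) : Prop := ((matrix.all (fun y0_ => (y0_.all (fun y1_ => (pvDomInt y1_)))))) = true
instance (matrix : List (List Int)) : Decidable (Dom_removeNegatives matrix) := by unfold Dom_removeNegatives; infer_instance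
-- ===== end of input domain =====

-- B replaces A's level-snapshot BFS (inner pass over len(queue) items popped with
-- queue.pop(0), counting passes that flip something) by a single multi-source BFS that
-- carries a distance per queue entry and returns the running maximum flip distance.
-- Both Pythons flip the matrix's negatives in place; the equivalence proved here is
-- about the RETURN value (the final matrix contents are the same flips either way).

-- shared indexing helpers, exact Python semantics (pyGetD/pySetD wrap negative indices;
-- the out-of-range default is unreachable wherever the Pythons return, every access
-- being guarded — Pre_ excludes the rows on which Python would raise IndexError)
def mget (m : List (List Int)) (r c : Int) : Int :=
  PySem.List.pyGetD (PySem.List.pyGetD m r []) c 0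

def mset (m : List (List Int)) (r c v : Int) : List (List Int) :=
  PySem.List.pySetD m r (PySem.List.pySetD (PySem.List.pyGetD m r []) c v)


-- number of negative entries; the termination measure of both BFS loops
def negCount (m : List (List Int)) : Nat :=
  (m.map (fun row => row.countP (fun x => decide (x < 0)))).sum

-- Python index/assignment groundwork: pySetD at an out-of-range or negative index
lemma pySetD_of_not_inRange {a : Type} (xs : List a) (i : Int) (v : a)
    (h : ¬ PySem.Raise.InRange xs.length i) : PySem.List.pySetD xs i v = xs := by
  unfold PySem.List.pySetD
  rw [(PySem.List.pySet?_eq_none_iff xs i v).mpr h]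
  rfl

lemma pyGetD_of_not_inRange {a : Type} (xs : List a) (i : Int) (d : a)
    (h : ¬ PySem.Raise.InRange xs.length i) : PySem.List.pyGetD xs i d = d :=
  PySem.List.pyGetD_of_none xs i d ((PySem.List.pyGet?_eq_none_iff xs i).mpr h)

lemma pySetD_neg_nat {a : Type} (xs : List a) (k : Nat) (v : a)
    (h1 : 0 < k) (h2 : k ≤ xs.length) :
    PySem.List.pySetD xs (-(k : Int)) v = xs.set (xs.length - k) v := by
  unfold PySem.List.pySetD PySem.List.pySet? PySem.List.pyIdx?
  have h0 : ¬ (0 ≤ -(k : Int)) := by omega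
  have h3 : -(xs.length : Int) ≤ -(k : Int) := by omega
  simp only [h0, if_false, h3, if_true, Option.map_some, Option.getD_some]
  congr 1
  omega

lemma inRange_iff (n : Nat) (i : Int) :
    PySem.Raise.InRange n i ↔ (-(n : Int) ≤ i ∧ i < n) := by
  unfold PySem.Raise.InRange; omega

-- every Python index resolves to a canonical list position (or is out of range)
lemma pyIdx_canon {a : Type} (xs : List a) (i : Int) (d : a) :
    (PySem.List.pyGetD xs i d = d ∧ ∀ v, PySem.List.pySetD xs i v = xs) ∨
      ∃ (j : Nat) (hj : j < xs.length), PySem.List.pyGetD xs i d = xs[j] ∧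
        ∀ v, PySem.List.pySetD xs i v = xs.set j v := by
  by_cases h : PySem.Raise.InRange xs.length i
  · right
    rw [inRange_iff] at h
    by_cases h0 : 0 ≤ i
    · exact ⟨i.toNat, by omega, PySem.List.pyGetD_eq_getElem xs d h0 (by omega),
        fun v => PySem.List.pySetD_of_nonneg xs v h0⟩
    · obtain ⟨k, rfl⟩ : ∃ k : Nat, i = -(k : Int) := ⟨(-i).toNat, by omega⟩
      refine ⟨xs.length - k, by omega, ?_, fun v => ?_⟩
      · rw [PySem.List.pyGetD_neg_natCast xs k d (by omega) (by omega)]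
      · rw [pySetD_neg_nat xs k v (by omega) (by omega)]
  · exact Or.inl ⟨pyGetD_of_not_inRange xs i d h, fun v => pySetD_of_not_inRange xs i v h⟩

lemma negCount_set_lt (m : List (List Int)) (i : Nat) (row' : List Int) (h : i < m.length)
    (hlt : row'.countP (fun x => decide (x < 0)) < (m[i]).countP (fun x => decide (x < 0))) :
    negCount (m.set i row') < negCount m := by
  induction m generalizing i with
  | nil => simp at h
  | cons hd tl ih =>
    cases i with
    | zero => simp [negCount] at hlt ⊢; omega
    | succ n =>
      simp only [List.set_cons_succ, negCount, List.map_cons, List.sum_cons] at ih ⊢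
      have := ih n (by simpa using h) (by simpa using hlt)
      omega

-- flipping a negative entry to a nonnegative one strictly lowers the measure
lemma negCount_mset_flip (m : List (List Int)) (r c v : Int)
    (hneg : mget m r c < 0) (hv : 0 ≤ v) : negCount (mset m r c v) < negCount m := by
  unfold mget at hneg
  unfold mset
  rcases pyIdx_canon m r ([] : List Int) with ⟨hg, _⟩ | ⟨j, hj, hg, hs⟩
  · rw [hg] at hneg
    rcases pyIdx_canon ([] : List Int) c (0 : Int) with ⟨hg2, _⟩ | ⟨j2, hj2, _, _⟩
    · rw [hg2] at hneg; omega
    · simp at hj2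
  · rw [hg] at hneg ⊢
    rcases pyIdx_canon (m[j]) c (0 : Int) with ⟨hg2, _⟩ | ⟨j2, hj2, hg2, hs2⟩
    · rw [hg2] at hneg; omega
    · rw [hg2] at hneg
      rw [hs2 v, hs]
      apply negCount_set_lt m j _ hj
      rw [List.countP_set hj2]
      have hpos : 0 < (m[j]).countP (fun x => decide (x < 0)) := by
        rw [List.countP_pos_iff]
        exact ⟨(m[j])[j2], List.getElem_mem hj2, by simpa using hneg⟩
      have hneg' : (decide ((m[j])[j2] < 0)) = true := by simpa using hneg
      have hv' : (decide (v < 0)) = false := by simp; omega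
      rw [hneg', hv']
      simp only [reduceIte, Bool.false_eq_true, if_false]
      omega

-- ===== PORT A =====

-- one of A's four `if` blocks: guard `g` re-reads the current matrix (as the Python
-- expressions `len(matrix)` / `len(matrix[0])` do); state = (matrix, appended, has_negative)
def aNb (st : List (List Int) × List (Int × Int) × Bool)
    (g : List (List Int) → Bool) (nr nc : Int) :
    List (List Int) × List (Int × Int) × Bool :=
  if g st.1 && decide (mget st.1 nr nc < 0) then
    (mset st.1 nr nc (mget st.1 nr nc * -1), st.2.1 ++ [(nr, nc)], true)
  else st

-- body of A's inner `for`: the four neighbour blocks, in A's order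
def aStep (st : List (List Int) × List (Int × Int) × Bool) (r c : Int) :
    List (List Int) × List (Int × Int) × Bool :=
  aNb (aNb (aNb (aNb st
    (fun _ => decide (0 ≤ c - 1)) r (c - 1))
    (fun mm => decide (c + 1 < ((PySem.List.pyGetD mm 0 []).length : Int))) r (c + 1))
    (fun _ => decide (0 ≤ r - 1)) (r - 1) c)
    (fun mm => decide (r + 1 < (mm.length : Int))) (r + 1) c

-- A's inner `for _ in range(len(queue))`: pops every current cell, accumulating appends
def aPass (st : List (List Int) × List (Int × Int) × Bool) (cells : List (Int × Int)) :
    List (List Int) × List (Int × Int) × Bool :=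
  cells.foldl (fun s rc => aStep s rc.1 rc.2) st

lemma aNb_hn_false (st : List (List Int) × List (Int × Int) × Bool)
    (g : List (List Int) → Bool) (nr nc : Int) (h : (aNb st g nr nc).2.2 = false) :
    aNb st g nr nc = st := by
  unfold aNb at h ⊢
  split at h <;> simp_all

lemma aNb_inv (st : List (List Int) × List (Int × Int) × Bool)
    (g : List (List Int) → Bool) (nr nc : Int) (n0 : Nat)
    (h1 : negCount st.1 ≤ n0) (h2 : st.2.2 = true → negCount st.1 < n0) :
    negCount (aNb st g nr nc).1 ≤ n0 ∧
      ((aNb st g nr nc).2.2 = true → negCount (aNb st g nr nc).1 < n0) := by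
  unfold aNb
  split
  · rename_i h
    simp only [Bool.and_eq_true, decide_eq_true_eq] at h
    have hf := negCount_mset_flip st.1 nr nc (mget st.1 nr nc * -1) h.2
      (by have := h.2; omega)
    exact ⟨le_of_lt (lt_of_lt_of_le hf h1), fun _ => lt_of_lt_of_le hf h1⟩
  · exact ⟨h1, h2⟩

lemma aStep_inv (st : List (List Int) × List (Int × Int) × Bool) (r c : Int) (n0 : Nat)
    (h1 : negCount st.1 ≤ n0) (h2 : st.2.2 = true → negCount st.1 < n0) :
    negCount (aStep st r c).1 ≤ n0 ∧
      ((aStep st r c).2.2 = true → negCount (aStep st r c).1 < n0) := by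
  unfold aStep
  have i1 := aNb_inv st (fun _ => decide (0 ≤ c - 1)) r (c - 1) n0 h1 h2
  have i2 := aNb_inv _ (fun mm => decide (c + 1 < ((PySem.List.pyGetD mm 0 []).length : Int)))
    r (c + 1) n0 i1.1 i1.2
  have i3 := aNb_inv _ (fun _ => decide (0 ≤ r - 1)) (r - 1) c n0 i2.1 i2.2
  exact aNb_inv _ (fun mm => decide (r + 1 < (mm.length : Int))) (r + 1) c n0 i3.1 i3.2

lemma aPass_inv (cells : List (Int × Int))
    (st : List (List Int) × List (Int × Int) × Bool) (n0 : Nat)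
    (h1 : negCount st.1 ≤ n0) (h2 : st.2.2 = true → negCount st.1 < n0) :
    negCount (aPass st cells).1 ≤ n0 ∧
      ((aPass st cells).2.2 = true → negCount (aPass st cells).1 < n0) := by
  induction cells generalizing st with
  | nil => exact ⟨h1, h2⟩
  | cons x t ih =>
    have hs := aStep_inv st x.1 x.2 n0 h1 h2
    exact ih (aStep st x.1 x.2) hs.1 hs.2

lemma aPass_hn_false (cells : List (Int × Int))
    (st : List (List Int) × List (Int × Int) × Bool)
    (h : (aPass st cells).2.2 = false) : aPass st cells = st := by
  induction cells generalizing st with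
  | nil => rfl
  | cons x t ih =>
    have hstep : aPass st (x :: t) = aPass (aStep st x.1 x.2) t := rfl
    rw [hstep] at h ⊢
    have e := ih (aStep st x.1 x.2) h
    rw [e] at h ⊢
    unfold aStep at h ⊢
    have e4 := aNb_hn_false _ _ _ _ h
    rw [e4] at h ⊢
    have e3 := aNb_hn_false _ _ _ _ h
    rw [e3] at h ⊢
    have e2 := aNb_hn_false _ _ _ _ h
    rw [e2] at h ⊢
    exact aNb_hn_false _ _ _ _ h

lemma aPass_measure (m : List (List Int)) (q : List (Int × Int)) (hq : q ≠ []) :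
    2 * negCount (aPass (m, [], false) q).1 +
        (if (aPass (m, [], false) q).2.1 = [] then 0 else 1) <
      2 * negCount m + (if q = [] then 0 else 1) := by
  rw [if_neg hq]
  by_cases ht : (aPass (m, [], false) q).2.2 = true
  · have hlt := (aPass_inv q (m, [], false) (negCount m) le_rfl (by simp)).2 ht
    have hle : (if (aPass (m, [], false) q).2.1 = [] then 0 else 1) ≤ 1 := by
      split <;> omega
    omega
  · have he := aPass_hn_false q (m, [], false) (by simpa using ht)
    rw [he]
    simp

-- A's outer `while queue:` loop
def aLoop (m : List (List Int)) (q : List (Int × Int)) (res : Int) : Int :=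
  if hq : q = [] then res
  else
    let t := aPass (m, [], false) q
    aLoop t.1 t.2.1 (if t.2.2 then res + 1 else res)
termination_by 2 * negCount m + (if q = [] then 0 else 1)
decreasing_by exact aPass_measure m q hq

def removeNegatives (matrix : List (List Int)) : Int :=
  let queue := (PySem.List.pyRange 0 (matrix.length : Int) 1).foldl (fun q row =>
    (PySem.List.pyRange 0 ((PySem.List.pyGetD matrix 0 []).length : Int) 1).foldl
      (fun q col => if mget matrix row col > 0 then q ++ [(row, col)] else q) q) []
  aLoop matrix queue 0

-- ===== PORT B =====

-- body of B's inner `for nr, nc in (...)`: bounds-checked flip, enqueue at d+1,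
-- running maximum; state = (matrix, rest-of-queue, best)
def bNb (rows cols d : Int)
    (st : List (List Int) × List (Int × Int × Int) × Int) (p : Int × Int) :
    List (List Int) × List (Int × Int × Int) × Int :=
  if 0 ≤ p.1 ∧ p.1 < rows ∧ 0 ≤ p.2 ∧ p.2 < cols ∧ mget st.1 p.1 p.2 < 0 then
    (mset st.1 p.1 p.2 (-(mget st.1 p.1 p.2)), st.2.1 ++ [(p.1, p.2, d + 1)],
      if st.2.2 < d + 1 then d + 1 else st.2.2)
  else st

def bStep (rows cols : Int) (m : List (List Int)) (r c d : Int)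
    (q : List (Int × Int × Int)) (best : Int) :
    List (List Int) × List (Int × Int × Int) × Int :=
  [(r, c - 1), (r, c + 1), (r - 1, c), (r + 1, c)].foldl (bNb rows cols d) (m, q, best)

lemma bNb_inv (rows cols d : Int)
    (st : List (List Int) × List (Int × Int × Int) × Int) (p : Int × Int) :
    negCount (bNb rows cols d st p).1 + (bNb rows cols d st p).2.1.length ≤
        negCount st.1 + st.2.1.length ∧
      negCount (bNb rows cols d st p).1 ≤ negCount st.1 := by
  unfold bNb
  split
  · rename_i h
    have hf := negCount_mset_flip st.1 p.1 p.2 (-(mget st.1 p.1 p.2)) h.2.2.2.2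
      (by have := h.2.2.2.2; omega)
    simp only [List.length_append, List.length_cons, List.length_nil]
    omega
  · omega

lemma bStep_measure (rows cols : Int) (m : List (List Int)) (r c d : Int)
    (q : List (Int × Int × Int)) (best : Int) :
    2 * negCount (bStep rows cols m r c d q best).1 +
        (bStep rows cols m r c d q best).2.1.length <
      2 * negCount m + (q.length + 1) := by
  unfold bStep
  simp only [List.foldl_cons, List.foldl_nil]
  have i1 := bNb_inv rows cols d (m, q, best) (r, c - 1)
  have i2 := bNb_inv rows cols d (bNb rows cols d (m, q, best) (r, c - 1)) (r, c + 1)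
  have i3 := bNb_inv rows cols d
    (bNb rows cols d (bNb rows cols d (m, q, best) (r, c - 1)) (r, c + 1)) (r - 1, c)
  have i4 := bNb_inv rows cols d
    (bNb rows cols d (bNb rows cols d (bNb rows cols d (m, q, best) (r, c - 1)) (r, c + 1))
      (r - 1, c)) (r + 1, c)
  simp only at i1 i2 i3 i4 ⊢
  omega

-- B's `while i < len(q):` scan of the growing queue (the processed prefix is dropped)
def bLoop (rows cols : Int) :
    List (List Int) → List (Int × Int × Int) → Int → Int
  | _, [], best => best
  | m, (r, c, d) :: rest, best =>
      let t := bStep rows cols m r c d rest best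
      bLoop rows cols t.1 t.2.1 t.2.2
termination_by m q _ => 2 * negCount m + q.length
decreasing_by exact bStep_measure rows cols m r c d rest best

def removeNegatives_alt (matrix : List (List Int)) : Int :=
  let rows : Int := matrix.length
  let cols : Int := if matrix = [] then 0 else ((PySem.List.pyGetD matrix 0 []).length : Int)
  let q := (PySem.List.pyRange 0 rows 1).foldl (fun q r =>
    (PySem.List.pyRange 0 cols 1).foldl
      (fun q c => if mget matrix r c > 0 then q ++ [(r, c, (0 : Int))] else q) q) []
  bLoop rows cols matrix q 0

-- ===== PRECONDITION & SPEC =====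
-- Pre_ excludes exactly the matrices on which the Python A raises IndexError: those with
-- a row shorter than the first row (the scan indexes every row up to len(matrix[0])).
def Pre_removeNegatives (matrix : List (List Int)) : Prop :=
  ∀ row ∈ matrix, (matrix.headD []).length ≤ row.length

instance (matrix : List (List Int)) : Decidable (Pre_removeNegatives matrix) := by
  unfold Pre_removeNegatives; infer_instance

def pvWitness_removeNegatives : List (List Int) := [[1, -2, 0], [-3, -4, -5]]

def Spec_removeNegatives (matrix : List (List Int)) (out : Int) : Prop :=
  out = removeNegatives_alt matrix
instance (matrix : List (List Int)) (out : Int) : Decidable (Spec_removeNegatives matrix out) := by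
  unfold Spec_removeNegatives; infer_instance

-- ===== CLAIM (what is proved, stated in full; the proofs are below) =====
def Claim_equal_removeNegatives : Prop := ∀ (matrix : List (List Int)),
  Dom_removeNegatives matrix → Pre_removeNegatives matrix →
    Spec_removeNegatives matrix (removeNegatives matrix)

-- ===== LEMMAS AND PROOFS =====

-- all queue cells lie inside the rows×cols grid
def InB (rows cols : Int) (q : List (Int × Int)) : Prop :=
  ∀ p ∈ q, 0 ≤ p.1 ∧ p.1 < rows ∧ 0 ≤ p.2 ∧ p.2 < cols

def tri (d : Int) (p : Int × Int) : Int × Int × Int := (p.1, p.2, d)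

-- relation between A's pass state and B's (matrix, queue-suffix, best) during one level
def StRel (d b0 : Int) (q0 : List (Int × Int × Int))
    (sa : List (List Int) × List (Int × Int) × Bool)
    (sb : List (List Int) × List (Int × Int × Int) × Int) : Prop :=
  sb.1 = sa.1 ∧ sb.2.1 = q0 ++ sa.2.1.map (tri (d + 1)) ∧
    sb.2.2 = (if sa.2.2 then (if b0 < d + 1 then d + 1 else b0) else b0)


-- `mset` never changes the shape of the matrix
lemma mset_len (m : List (List Int)) (r c v : Int) : (mset m r c v).length = m.length := by
  unfold mset; exact PySem.List.length_pySetD m r _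

lemma mset_row0 (m : List (List Int)) (r c v : Int) :
    (PySem.List.pyGetD (mset m r c v) 0 []).length = (PySem.List.pyGetD m 0 []).length := by
  unfold mset
  rcases pyIdx_canon m r ([] : List Int) with ⟨_, hs⟩ | ⟨j, hj, hg, hs⟩
  · rw [hs]
  · rw [hs, hg]
    simp only [PySem.List.pyGetD_zero, List.getD_eq_getElem?_getD, List.getElem?_set]
    by_cases h0 : j = 0
    · subst h0
      simp [hj, PySem.List.length_pySetD]
    · simp [h0]

lemma aNb_len (st : List (List Int) × List (Int × Int) × Bool)
    (g : List (List Int) → Bool) (nr nc : Int) :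
    (aNb st g nr nc).1.length = st.1.length ∧
      (PySem.List.pyGetD (aNb st g nr nc).1 0 []).length =
        (PySem.List.pyGetD st.1 0 []).length := by
  unfold aNb; split
  · exact ⟨mset_len _ _ _ _, mset_row0 _ _ _ _⟩
  · exact ⟨rfl, rfl⟩

lemma aStep_len (st : List (List Int) × List (Int × Int) × Bool) (r c : Int) :
    (aStep st r c).1.length = st.1.length ∧
      (PySem.List.pyGetD (aStep st r c).1 0 []).length =
        (PySem.List.pyGetD st.1 0 []).length := by
  unfold aStep
  have l1 := aNb_len st (fun _ => decide (0 ≤ c - 1)) r (c - 1)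
  have l2 := aNb_len (aNb st (fun _ => decide (0 ≤ c - 1)) r (c - 1)) (fun mm => decide (c + 1 < ((PySem.List.pyGetD mm 0 []).length : Int))) r (c + 1)
  have l3 := aNb_len (aNb (aNb st (fun _ => decide (0 ≤ c - 1)) r (c - 1)) (fun mm => decide (c + 1 < ((PySem.List.pyGetD mm 0 []).length : Int))) r (c + 1)) (fun _ => decide (0 ≤ r - 1)) (r - 1) c
  have l4 := aNb_len (aNb (aNb (aNb st (fun _ => decide (0 ≤ c - 1)) r (c - 1)) (fun mm => decide (c + 1 < ((PySem.List.pyGetD mm 0 []).length : Int))) r (c + 1)) (fun _ => decide (0 ≤ r - 1)) (r - 1) c) (fun mm => decide (r + 1 < (mm.length : Int))) (r + 1) c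
  exact ⟨by rw [l4.1, l3.1, l2.1, l1.1], by rw [l4.2, l3.2, l2.2, l1.2]⟩

lemma aPass_len (cells : List (Int × Int)) (st : List (List Int) × List (Int × Int) × Bool) :
    (aPass st cells).1.length = st.1.length ∧
      (PySem.List.pyGetD (aPass st cells).1 0 []).length =
        (PySem.List.pyGetD st.1 0 []).length := by
  induction cells generalizing st with
  | nil => exact ⟨rfl, rfl⟩
  | cons x t ih =>
    have hs := aStep_len st x.1 x.2
    have ht := ih (aStep st x.1 x.2)
    exact ⟨by rw [show aPass st (x :: t) = aPass (aStep st x.1 x.2) t from rfl, ht.1, hs.1],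
      by rw [show aPass st (x :: t) = aPass (aStep st x.1 x.2) t from rfl, ht.2, hs.2]⟩

-- one neighbour: A's `if` block and B's loop body act identically on related states
lemma nb_bridge (R C d b0 : Int) (q0 : List (Int × Int × Int))
    (sa : List (List Int) × List (Int × Int) × Bool)
    (sb : List (List Int) × List (Int × Int × Int) × Int)
    (g : List (List Int) → Bool) (nr nc : Int)
    (hrel : StRel d b0 q0 sa sb)
    (hg : g sa.1 = true ↔ (0 ≤ nr ∧ nr < R ∧ 0 ≤ nc ∧ nc < C)) :
    StRel d b0 q0 (aNb sa g nr nc) (bNb R C d sb (nr, nc)) := by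
  obtain ⟨h1, h2, h3⟩ := hrel
  unfold aNb bNb
  by_cases hc : g sa.1 = true ∧ mget sa.1 nr nc < 0
  · rw [if_pos (by simp [hc.1, hc.2]),
      if_pos (by rw [h1]; exact ⟨(hg.mp hc.1).1, (hg.mp hc.1).2.1, (hg.mp hc.1).2.2.1,
        (hg.mp hc.1).2.2.2, hc.2⟩)]
    refine ⟨by rw [h1, mul_neg_one], ?_, ?_⟩
    · simp only [h2, tri, List.map_append, List.map_cons, List.map_nil,
        List.append_assoc]
    · simp only [h3]
      split_ifs <;> omega
  · rw [if_neg (by simp only [Bool.and_eq_true, decide_eq_true_eq]; tauto),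
      if_neg (by rw [h1]; intro hb; exact hc ⟨hg.mpr ⟨hb.1, hb.2.1, hb.2.2.1, hb.2.2.2.1⟩,
        hb.2.2.2.2⟩)]
    exact ⟨h1, h2, h3⟩

-- one cell: A's four `if` blocks match B's fold over the four neighbours
lemma step_bridge (R C d b0 : Int) (q0 : List (Int × Int × Int))
    (sa : List (List Int) × List (Int × Int) × Bool)
    (m : List (List Int)) (qq : List (Int × Int × Int)) (bb r c : Int)
    (hrel : StRel d b0 q0 sa (m, qq, bb))
    (hR : (sa.1.length : Int) = R)
    (hC : ((PySem.List.pyGetD sa.1 0 []).length : Int) = C)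
    (hr : 0 ≤ r ∧ r < R ∧ 0 ≤ c ∧ c < C) :
    StRel d b0 q0 (aStep sa r c) (bStep R C m r c d qq bb) := by
  unfold aStep bStep
  simp only [List.foldl_cons, List.foldl_nil]
  have e1 := aNb_len sa (fun _ => decide (0 ≤ c - 1)) r (c - 1)
  have e2 := aNb_len (aNb sa (fun _ => decide (0 ≤ c - 1)) r (c - 1)) (fun mm => decide (c + 1 < ((PySem.List.pyGetD mm 0 []).length : Int))) r (c + 1)
  have e3 := aNb_len (aNb (aNb sa (fun _ => decide (0 ≤ c - 1)) r (c - 1)) (fun mm => decide (c + 1 < ((PySem.List.pyGetD mm 0 []).length : Int))) r (c + 1)) (fun _ => decide (0 ≤ r - 1)) (r - 1) c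
  have b1 := nb_bridge R C d b0 q0 sa (m, qq, bb) (fun _ => decide (0 ≤ c - 1)) r (c - 1) hrel
    (by simp only [decide_eq_true_eq]; omega)
  have b2 := nb_bridge R C d b0 q0 (aNb sa (fun _ => decide (0 ≤ c - 1)) r (c - 1)) _ (fun mm => decide (c + 1 < ((PySem.List.pyGetD mm 0 []).length : Int))) r (c + 1) b1
    (by simp only [decide_eq_true_eq, e1.2, hC]; omega)
  have b3 := nb_bridge R C d b0 q0 (aNb (aNb sa (fun _ => decide (0 ≤ c - 1)) r (c - 1)) (fun mm => decide (c + 1 < ((PySem.List.pyGetD mm 0 []).length : Int))) r (c + 1)) _ (fun _ => decide (0 ≤ r - 1)) (r - 1) c b2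
    (by simp only [decide_eq_true_eq]; omega)
  have b4 := nb_bridge R C d b0 q0 (aNb (aNb (aNb sa (fun _ => decide (0 ≤ c - 1)) r (c - 1)) (fun mm => decide (c + 1 < ((PySem.List.pyGetD mm 0 []).length : Int))) r (c + 1)) (fun _ => decide (0 ≤ r - 1)) (r - 1) c) _ (fun mm => decide (r + 1 < (mm.length : Int))) (r + 1) c b3
    (by simp only [decide_eq_true_eq, e3.1, e2.1, e1.1, hR]; omega)
  exact b4

-- B's per-cell fold only appends: an untouched queue prefix passes through
lemma bNb_pre (R C d : Int) (m : List (List Int)) (q : List (Int × Int × Int))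
    (b : Int) (pre : List (Int × Int × Int)) (p : Int × Int) :
    bNb R C d (m, pre ++ q, b) p =
      ((bNb R C d (m, q, b) p).1, pre ++ (bNb R C d (m, q, b) p).2.1,
        (bNb R C d (m, q, b) p).2.2) := by
  unfold bNb
  split <;> simp [List.append_assoc]

lemma bStep_pre (R C : Int) (m : List (List Int)) (r c d : Int)
    (q : List (Int × Int × Int)) (b : Int) (pre : List (Int × Int × Int)) :
    bStep R C m r c d (pre ++ q) b =
      ((bStep R C m r c d q b).1, pre ++ (bStep R C m r c d q b).2.1,
        (bStep R C m r c d q b).2.2) := by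
  unfold bStep
  simp only [List.foldl_cons, List.foldl_nil]
  rw [bNb_pre, bNb_pre, bNb_pre, bNb_pre]

-- cells appended by A's pass stay inside the grid
lemma aNb_bounds (R C : Int) (sa : List (List Int) × List (Int × Int) × Bool)
    (g : List (List Int) → Bool) (nr nc : Int)
    (hg : g sa.1 = true → (0 ≤ nr ∧ nr < R ∧ 0 ≤ nc ∧ nc < C))
    (hq : InB R C sa.2.1) : InB R C (aNb sa g nr nc).2.1 := by
  unfold aNb
  split <;> rename_i h
  · simp only [Bool.and_eq_true, decide_eq_true_eq] at h
    intro p hp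
    rcases List.mem_append.mp hp with hp | hp
    · exact hq p hp
    · simp at hp
      subst hp
      exact hg h.1
  · exact hq

lemma aStep_bounds (R C : Int) (sa : List (List Int) × List (Int × Int) × Bool) (r c : Int)
    (hR : (sa.1.length : Int) = R)
    (hC : ((PySem.List.pyGetD sa.1 0 []).length : Int) = C)
    (hr : 0 ≤ r ∧ r < R ∧ 0 ≤ c ∧ c < C)
    (hq : InB R C sa.2.1) : InB R C (aStep sa r c).2.1 := by
  unfold aStep
  have e1 := aNb_len sa (fun _ => decide (0 ≤ c - 1)) r (c - 1)
  have e2 := aNb_len (aNb sa (fun _ => decide (0 ≤ c - 1)) r (c - 1)) (fun mm => decide (c + 1 < ((PySem.List.pyGetD mm 0 []).length : Int))) r (c + 1)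
  have e3 := aNb_len (aNb (aNb sa (fun _ => decide (0 ≤ c - 1)) r (c - 1)) (fun mm => decide (c + 1 < ((PySem.List.pyGetD mm 0 []).length : Int))) r (c + 1)) (fun _ => decide (0 ≤ r - 1)) (r - 1) c
  apply aNb_bounds R C (aNb (aNb (aNb sa (fun _ => decide (0 ≤ c - 1)) r (c - 1)) (fun mm => decide (c + 1 < ((PySem.List.pyGetD mm 0 []).length : Int))) r (c + 1)) (fun _ => decide (0 ≤ r - 1)) (r - 1) c) (fun mm => decide (r + 1 < (mm.length : Int))) (r + 1) c
    (by simp only [decide_eq_true_eq, e3.1, e2.1, e1.1, hR]; omega)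
  apply aNb_bounds R C (aNb (aNb sa (fun _ => decide (0 ≤ c - 1)) r (c - 1)) (fun mm => decide (c + 1 < ((PySem.List.pyGetD mm 0 []).length : Int))) r (c + 1)) (fun _ => decide (0 ≤ r - 1)) (r - 1) c
    (by simp only [decide_eq_true_eq]; omega)
  apply aNb_bounds R C (aNb sa (fun _ => decide (0 ≤ c - 1)) r (c - 1)) (fun mm => decide (c + 1 < ((PySem.List.pyGetD mm 0 []).length : Int))) r (c + 1)
    (by simp only [decide_eq_true_eq, e1.2, hC]; omega)
  apply aNb_bounds R C sa (fun _ => decide (0 ≤ c - 1)) r (c - 1)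
    (by simp only [decide_eq_true_eq]; omega)
  exact hq

lemma aPass_bounds (R C : Int) (cells : List (Int × Int))
    (sa : List (List Int) × List (Int × Int) × Bool)
    (hR : (sa.1.length : Int) = R)
    (hC : ((PySem.List.pyGetD sa.1 0 []).length : Int) = C)
    (hcells : InB R C cells) (hq : InB R C sa.2.1) : InB R C (aPass sa cells).2.1 := by
  induction cells generalizing sa with
  | nil => exact hq
  | cons x t ih =>
    rw [show aPass sa (x :: t) = aPass (aStep sa x.1 x.2) t from rfl]
    have hx := hcells x List.mem_cons_self
    have hl := aStep_len sa x.1 x.2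
    exact ih (aStep sa x.1 x.2) (by rw [hl.1]; exact hR) (by rw [hl.2]; exact hC)
      (fun p hp => hcells p (List.mem_cons_of_mem _ hp))
      (aStep_bounds R C sa x.1 x.2 hR hC hx hq)

-- one whole level: B's flat scan over the level equals A's pass
lemma pass_bridge (R C d b0 : Int) (l1 : List (Int × Int)) :
    ∀ (q0 : List (Int × Int × Int)) (sa : List (List Int) × List (Int × Int) × Bool)
      (sb : List (List Int) × List (Int × Int × Int) × Int),
      StRel d b0 q0 sa sb →
      (sa.1.length : Int) = R → ((PySem.List.pyGetD sa.1 0 []).length : Int) = C →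
      InB R C l1 →
      bLoop R C sb.1 (l1.map (tri d) ++ sb.2.1) sb.2.2 =
        bLoop R C (aPass sa l1).1 (q0 ++ (aPass sa l1).2.1.map (tri (d + 1)))
          (if (aPass sa l1).2.2 then (if b0 < d + 1 then d + 1 else b0) else b0) := by
  induction l1 with
  | nil =>
    intro q0 sa sb ⟨h1, h2, h3⟩ hR hC _
    simp only [List.map_nil, List.nil_append]
    rw [h1, h2, h3]
    rfl
  | cons x t ih =>
    intro q0 sa sb hrel hR hC hb
    obtain ⟨h1, h2, h3⟩ := hrel
    have hx := hb x List.mem_cons_self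
    simp only [List.map_cons, List.cons_append]
    rw [show (tri d x) = (x.1, x.2, d) from rfl]
    rw [bLoop]
    rw [bStep_pre R C sb.1 x.1 x.2 d sb.2.1 sb.2.2 (t.map (tri d))]
    have hrel' : StRel d b0 q0 (aStep sa x.1 x.2) (bStep R C sb.1 x.1 x.2 d sb.2.1 sb.2.2) := by
      apply step_bridge R C d b0 q0 sa sb.1 sb.2.1 sb.2.2 x.1 x.2 ⟨h1, h2, h3⟩ hR hC hx
    have hl := aStep_len sa x.1 x.2
    have := ih q0 (aStep sa x.1 x.2)
      ((bStep R C sb.1 x.1 x.2 d sb.2.1 sb.2.2).1,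
        (bStep R C sb.1 x.1 x.2 d sb.2.1 sb.2.2).2.1,
        (bStep R C sb.1 x.1 x.2 d sb.2.1 sb.2.2).2.2)
      hrel' (by rw [hl.1]; exact hR) (by rw [hl.2]; exact hC)
      (fun p hp => hb p (List.mem_cons_of_mem _ hp))
    simpa using this

lemma aLoop_nil (m : List (List Int)) (res : Int) : aLoop m [] res = res := by
  rw [aLoop]; simp

lemma aLoop_cons (m : List (List Int)) (q : List (Int × Int)) (res : Int) (hq : q ≠ []) :
    aLoop m q res =
      aLoop (aPass (m, [], false) q).1 (aPass (m, [], false) q).2.1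
        (if (aPass (m, [], false) q).2.2 then res + 1 else res) := by
  rw [aLoop]; simp [hq]

lemma bLoop_nil (R C : Int) (m : List (List Int)) (best : Int) :
    bLoop R C m [] best = best := by
  rw [bLoop]

-- A's `res` accumulator only shifts the result
lemma aLoop_shift : ∀ (n : Nat) (m : List (List Int)) (q : List (Int × Int)),
    2 * negCount m + (if q = [] then 0 else 1) ≤ n →
    ∀ res, aLoop m q res = res + aLoop m q 0 := by
  intro n
  induction n with
  | zero =>
    intro m q h res
    have hq : q = [] := by by_contra hq; rw [if_neg hq] at h; omega
    rw [hq, aLoop_nil, aLoop_nil]; omega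
  | succ n ih =>
    intro m q h res
    by_cases hq : q = []
    · rw [hq, aLoop_nil, aLoop_nil]; omega
    · have hm := aPass_measure m q hq
      rw [if_neg hq] at h
      rw [aLoop_cons m q res hq, aLoop_cons m q 0 hq]
      have h' : 2 * negCount (aPass (m, [], false) q).1 +
          (if (aPass (m, [], false) q).2.1 = [] then 0 else 1) ≤ n := by
        rw [if_neg hq] at hm; omega
      rw [ih _ _ h' (if (aPass (m, [], false) q).2.2 then res + 1 else res),
        ih _ _ h' (if (aPass (m, [], false) q).2.2 then 0 + 1 else 0)]
      split_ifs <;> omega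

lemma aLoop_nonneg : ∀ (n : Nat) (m : List (List Int)) (q : List (Int × Int)),
    2 * negCount m + (if q = [] then 0 else 1) ≤ n → 0 ≤ aLoop m q 0 := by
  intro n
  induction n with
  | zero =>
    intro m q h
    have hq : q = [] := by by_contra hq; rw [if_neg hq] at h; omega
    rw [hq, aLoop_nil]
  | succ n ih =>
    intro m q h
    by_cases hq : q = []
    · rw [hq, aLoop_nil]
    · have hm := aPass_measure m q hq
      rw [if_neg hq] at h hm
      have h' : 2 * negCount (aPass (m, [], false) q).1 +
          (if (aPass (m, [], false) q).2.1 = [] then 0 else 1) ≤ n := by omega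
      rw [aLoop_cons m q 0 hq, aLoop_shift n _ _ h' (if (aPass (m, [], false) q).2.2
        then 0 + 1 else 0)]
      have := ih _ _ h'
      split_ifs <;> omega

-- the heart of the equivalence: B's distance-tagged loop computes, level by level,
-- `d` plus the number of flipping passes A still has to make
lemma level_eq (R C : Int) : ∀ (n : Nat) (m : List (List Int)) (q : List (Int × Int))
    (best d : Int),
    2 * negCount m + (if q = [] then 0 else 1) ≤ n →
    (m.length : Int) = R → ((PySem.List.pyGetD m 0 []).length : Int) = C → InB R C q →
    bLoop R C m (q.map (tri d)) best =
      (if aLoop m q 0 = 0 then best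
       else if best < d + aLoop m q 0 then d + aLoop m q 0 else best) := by
  intro n
  induction n with
  | zero =>
    intro m q best d h _ _ _
    have hq : q = [] := by by_contra hq; rw [if_neg hq] at h; omega
    rw [hq, aLoop_nil]
    simp [bLoop_nil]
  | succ n ih =>
    intro m q best d h hR hC hq
    by_cases hqe : q = []
    · rw [hqe, aLoop_nil]
      simp [bLoop_nil]
    · have hm := aPass_measure m q hqe
      rw [if_neg hqe] at h hm
      have hrel : StRel d best [] (m, [], false) (m, [], best) := ⟨rfl, rfl, rfl⟩
      have hpb := pass_bridge R C d best q [] (m, [], false) (m, [], best) hrel hR hC hq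
      simp only [List.append_nil, List.nil_append] at hpb
      rw [hpb]
      have hlen := aPass_len q (m, [], false)
      have h' : 2 * negCount (aPass (m, [], false) q).1 +
          (if (aPass (m, [], false) q).2.1 = [] then 0 else 1) ≤ n := by omega
      have hbnd : InB R C (aPass (m, [], false) q).2.1 :=
        aPass_bounds R C q (m, [], false) hR hC hq (by intro p hp; cases hp)
      rw [ih _ _ (if (aPass (m, [], false) q).2.2
            then (if best < d + 1 then d + 1 else best) else best) (d + 1) h'
          (by rw [hlen.1]; exact hR) (by rw [hlen.2]; exact hC) hbnd]
      rw [aLoop_cons m q 0 hqe,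
        aLoop_shift n _ _ h' (if (aPass (m, [], false) q).2.2 then 0 + 1 else 0)]
      have hnn := aLoop_nonneg n _ _ h'
      by_cases htn : (aPass (m, [], false) q).2.2 = true
      · rw [htn]
        simp only [if_true]
        split_ifs <;> omega
      · have hid := aPass_hn_false q (m, [], false) (by simpa using htn)
        have ht1 : (aPass (m, [], false) q).2.1 = [] := by rw [hid]
        have ht2 : (aPass (m, [], false) q).2.2 = false := by rw [hid]
        rw [ht1, ht2, aLoop_nil]
        simp

-- the two initial scans build the same queue (B's entries carrying distance 0)
def scanA (matrix : List (List Int)) : List (Int × Int) :=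
  (PySem.List.pyRange 0 (matrix.length : Int) 1).foldl (fun q row =>
    (PySem.List.pyRange 0 ((PySem.List.pyGetD matrix 0 []).length : Int) 1).foldl
      (fun q col => if mget matrix row col > 0 then q ++ [(row, col)] else q) q) []

def scanB (matrix : List (List Int)) : List (Int × Int × Int) :=
  (PySem.List.pyRange 0 (matrix.length : Int) 1).foldl (fun q r =>
    (PySem.List.pyRange 0 (if matrix = [] then 0 else
        ((PySem.List.pyGetD matrix 0 []).length : Int)) 1).foldl
      (fun q c => if mget matrix r c > 0 then q ++ [(r, c, (0 : Int))] else q) q) []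

lemma removeNegatives_eq (matrix : List (List Int)) :
    removeNegatives matrix = aLoop matrix (scanA matrix) 0 := rfl

lemma removeNegatives_alt_eq (matrix : List (List Int)) :
    removeNegatives_alt matrix =
      bLoop (matrix.length : Int)
        (if matrix = [] then 0 else ((PySem.List.pyGetD matrix 0 []).length : Int))
        matrix (scanB matrix) 0 := rfl

lemma scanA_eq (matrix : List (List Int)) :
    scanA matrix = (PySem.List.pyRange 0 (matrix.length : Int) 1).flatMap (fun row =>
      ((PySem.List.pyRange 0 ((PySem.List.pyGetD matrix 0 []).length : Int) 1).filter
        (fun col => decide (mget matrix row col > 0))).map (fun col => (row, col))) := by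
  unfold scanA
  simp only [PySem.List.foldl_append_ite, PySem.List.foldl_append_eq_flatMap,
    List.nil_append]

lemma scanB_eq (matrix : List (List Int)) :
    scanB matrix = (PySem.List.pyRange 0 (matrix.length : Int) 1).flatMap (fun row =>
      ((PySem.List.pyRange 0 (if matrix = [] then 0 else
          ((PySem.List.pyGetD matrix 0 []).length : Int)) 1).filter
        (fun col => decide (mget matrix row col > 0))).map (fun col => (row, col, (0 : Int)))) := by
  unfold scanB
  simp only [PySem.List.foldl_append_ite, PySem.List.foldl_append_eq_flatMap,
    List.nil_append]

lemma scanB_map (matrix : List (List Int)) : scanB matrix = (scanA matrix).map (tri 0) := by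
  rw [scanA_eq, scanB_eq]
  by_cases hm : matrix = []
  · subst hm
    simp [PySem.List.pyRange_one_eq_nil]
  · rw [if_neg hm]
    rw [List.map_flatMap]
    apply List.flatMap_congr
    intro a _
    rw [List.map_map]
    apply List.map_congr_left
    intro col _
    rfl

lemma scanA_bounds (matrix : List (List Int)) :
    InB (matrix.length : Int) ((PySem.List.pyGetD matrix 0 []).length : Int)
      (scanA matrix) := by
  rw [scanA_eq]
  intro p hp
  rcases List.mem_flatMap.mp hp with ⟨row, hrow, hp2⟩
  rcases List.mem_map.mp hp2 with ⟨col, hcol, rfl⟩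
  have h1 := (PySem.List.mem_pyRange_one).mp hrow
  have h2 := (PySem.List.mem_pyRange_one).mp (List.mem_of_mem_filter hcol)
  exact ⟨h1.1, h1.2, h2.1, h2.2⟩

theorem removeNegatives_spec : Claim_equal_removeNegatives := by
  intro matrix _ _
  unfold Spec_removeNegatives
  rw [removeNegatives_eq, removeNegatives_alt_eq, scanB_map]
  have hC' : (if matrix = [] then 0 else ((PySem.List.pyGetD matrix 0 []).length : Int)) =
      ((PySem.List.pyGetD matrix 0 []).length : Int) := by
    by_cases hm : matrix = [] <;> simp [hm, PySem.List.pyGetD_zero]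
  rw [hC']
  rw [level_eq (matrix.length : Int) ((PySem.List.pyGetD matrix 0 []).length : Int)
    (2 * negCount matrix + (if scanA matrix = [] then 0 else 1)) matrix (scanA matrix) 0 0
    le_rfl rfl rfl (scanA_bounds matrix)]
  have hnn := aLoop_nonneg (2 * negCount matrix + (if scanA matrix = [] then 0 else 1))
    matrix (scanA matrix) le_rfl
  split_ifs <;> omega
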